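-- pv_equiv track=rewrite | github.com/CeticGowhtamraj/resume_analyzer_v2 | perfect.py | determine_job_field
-- ===== SOURCE A (Python) =====
-- def determine_job_field(skills_by_category):
--     field_weights = {
--         'Data Science': {
--             'Data Science & AI': 3,
--             'Programming Languages': 1
--         },
--         'Web Development': {
--             'Web Development': 3,
--             'Programming Languages': 1
--         },
--         'Mobile Development': {
--             'Mobile Development': 3
--         },
--         'UI/UX Design': {
--             'UI/UX Design': 3
--         },
--         'DevOps': {
--             'Cloud & DevOps': 3
--         },
--         'Full Stack Development': {
--             'Web Development': 2,
--             'Databases': 2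
--         }
--     }
--
--     field_scores = {}
--     for field, weights in field_weights.items():
--         score = 0
--         for category, weight in weights.items():
--             if category in skills_by_category:
--                 score += len(skills_by_category[category]) * weight
--         field_scores[field] = score
--
--     if not field_scores or max(field_scores.values()) == 0:
--         return None
--
--     return max(field_scores, key=field_scores.get)
-- ===== SOURCE B (Python) =====
-- def determine_job_field(skills_by_category):
--     # Inverted index: category -> [(field, weight)]; one pass over the input instead of a scan per field.
--     fields = ['Data Science', 'Web Development', 'Mobile Development',
--               'UI/UX Design', 'DevOps', 'Full Stack Development']
--     index = {
--         'Data Science & AI': [('Data Science', 3)],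
--         'Programming Languages': [('Data Science', 1), ('Web Development', 1)],
--         'Web Development': [('Web Development', 3), ('Full Stack Development', 2)],
--         'Mobile Development': [('Mobile Development', 3)],
--         'UI/UX Design': [('UI/UX Design', 3)],
--         'Cloud & DevOps': [('DevOps', 3)],
--         'Databases': [('Full Stack Development', 2)],
--     }
--     scores = dict.fromkeys(fields, 0)
--     for category, skills in skills_by_category.items():
--         for field, weight in index.get(category, []):
--             scores[field] += len(skills) * weight
--     best = max(scores, key=scores.get)
--     if scores[best] == 0:
--         return None
--     return best
-- ===== Notes on version B (the rewrite author's own statement) =====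
-- stated objective: alternative
-- what changed: Replaces the per-field rescan of the input (looking up each weighted category for every field) by a single pass over the input items that scatters len(skills)*weight through a precomputed inverted category->(field,weight) index into scores initialised in the original field order.
import Mathlib
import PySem

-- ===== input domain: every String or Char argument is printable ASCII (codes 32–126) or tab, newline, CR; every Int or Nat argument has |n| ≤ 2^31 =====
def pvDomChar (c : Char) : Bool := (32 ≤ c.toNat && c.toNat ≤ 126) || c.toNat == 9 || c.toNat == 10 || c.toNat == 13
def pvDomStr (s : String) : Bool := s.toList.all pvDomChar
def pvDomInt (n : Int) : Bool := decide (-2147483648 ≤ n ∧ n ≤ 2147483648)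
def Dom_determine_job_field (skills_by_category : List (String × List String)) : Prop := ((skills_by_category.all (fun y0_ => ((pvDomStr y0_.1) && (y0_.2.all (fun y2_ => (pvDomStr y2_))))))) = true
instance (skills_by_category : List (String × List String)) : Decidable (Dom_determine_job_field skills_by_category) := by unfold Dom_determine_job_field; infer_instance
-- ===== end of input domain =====

-- B replaces the per-field rescan of the input by a single pass over the input with an inverted
-- category→(field,weight) index (objective: alternative decomposition; same exact result).

-- ===== PORT A =====
def pvFieldWeights : List (String × List (String × Int)) :=
  [("Data Science", [("Data Science & AI", 3), ("Programming Languages", 1)]),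
   ("Web Development", [("Web Development", 3), ("Programming Languages", 1)]),
   ("Mobile Development", [("Mobile Development", 3)]),
   ("UI/UX Design", [("UI/UX Design", 3)]),
   ("DevOps", [("Cloud & DevOps", 3)]),
   ("Full Stack Development", [("Web Development", 2), ("Databases", 2)])]

def determine_job_field (skills_by_category : List (String × List String)) : Option String :=
  let skills := PySem.Dict.mk skills_by_category
  let field_scores := pvFieldWeights.foldl (fun d fw =>
    let score := fw.2.foldl (fun s cw =>
      if skills.contains cw.1 then s + ((skills.getD cw.1 []).length : Int) * cw.2 else s) 0
    d.insert fw.1 score) (PySem.Dict.empty : PySem.Dict String Int)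
  if field_scores.size = 0 ∨ PySem.List.max? field_scores.values (fun v => v) = some 0 then
    none
  else
    PySem.List.max? field_scores.keys (fun k => field_scores.getD k 0)

-- ===== PORT B =====
def pvFields : List String :=
  ["Data Science", "Web Development", "Mobile Development",
   "UI/UX Design", "DevOps", "Full Stack Development"]

def pvIndex : PySem.Dict String (List (String × Int)) :=
  PySem.Dict.mk
    [("Data Science & AI", [("Data Science", 3)]),
     ("Programming Languages", [("Data Science", 1), ("Web Development", 1)]),
     ("Web Development", [("Web Development", 3), ("Full Stack Development", 2)]),
     ("Mobile Development", [("Mobile Development", 3)]),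
     ("UI/UX Design", [("UI/UX Design", 3)]),
     ("Cloud & DevOps", [("DevOps", 3)]),
     ("Databases", [("Full Stack Development", 2)])]

-- loop body of B's pass over the input items
def pvAddItem (d : PySem.Dict String Int) (kv : String × List String) : PySem.Dict String Int :=
  (pvIndex.getD kv.1 []).foldl
    (fun d fw => d.modify fw.1 0 (fun s => s + (kv.2.length : Int) * fw.2)) d

def determine_job_field_alt (skills_by_category : List (String × List String)) : Option String :=
  let scores0 := pvFields.foldl (fun d f => d.insert f 0) (PySem.Dict.empty : PySem.Dict String Int)
  let scores := skills_by_category.foldl pvAddItem scores0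
  match PySem.List.max? scores.keys (fun k => scores.getD k 0) with
  | some best => if scores.getD best 0 = 0 then none else some best
  | none => none

-- ===== PRECONDITION & SPEC =====
-- Pre_ excludes association lists with duplicate category keys: the Python parameter is a dict,
-- which cannot hold duplicate keys, so such lists represent no Python input.
def Pre_determine_job_field (skills_by_category : List (String × List String)) : Prop :=
  (skills_by_category.map Prod.fst).Nodup
instance (skills_by_category : List (String × List String)) : Decidable (Pre_determine_job_field skills_by_category) := by unfold Pre_determine_job_field; infer_instance

def pvWitness_determine_job_field : (List (String × List String)) :=
  [("Web Development", ["html", "css"]), ("Databases", ["sql"])]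

def Spec_determine_job_field (skills_by_category : List (String × List String)) (out : Option String) : Prop := out = determine_job_field_alt skills_by_category
instance (skills_by_category : List (String × List String)) (out : Option String) : Decidable (Spec_determine_job_field skills_by_category out) := by unfold Spec_determine_job_field; infer_instance

-- ===== CLAIM (what is proved, stated in full; the proofs are below) =====
def Claim_equal_determine_job_field : Prop := ∀ (skills_by_category : List (String × List String)), Dom_determine_job_field skills_by_category → Pre_determine_job_field skills_by_category → Spec_determine_job_field skills_by_category (determine_job_field skills_by_category)

-- ===== LEMMAS AND PROOFS =====

-- value A reads for a category: length of the first-match entry, 0 when absent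
def pvG (skills : List (String × List String)) (c : String) : Int :=
  ((PySem.Dict.mk skills).getD c []).length

-- value B accumulates for a category: sum of entry lengths over all matches
def pvS (c : String) (l : List (String × List String)) : Int :=
  (l.map (fun kv => if kv.1 = c then (kv.2.length : Int) else 0)).sum

def pvMk6 (a b c d e f : Int) : PySem.Dict String Int :=
  PySem.Dict.mk [("Data Science", a), ("Web Development", b), ("Mobile Development", c),
                 ("UI/UX Design", d), ("DevOps", e), ("Full Stack Development", f)]

def pvTail (d : PySem.Dict String Int) : Option String :=
  if d.size = 0 ∨ PySem.List.max? d.values (fun v => v) = some 0 then none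
  else PySem.List.max? d.keys (fun k => d.getD k 0)

def pvTailB (d : PySem.Dict String Int) : Option String :=
  match PySem.List.max? d.keys (fun k => d.getD k 0) with
  | some best => if d.getD best 0 = 0 then none else some best
  | none => none

theorem pvStepA (d : PySem.Dict String (List String)) (s w : Int) (c : String) :
    (if d.contains c then s + ((d.getD c []).length : Int) * w else s)
      = s + ((d.getD c []).length : Int) * w := by
  by_cases h : d.contains c
  · simp [h]
  · simp only [Bool.not_eq_true] at h
    rw [if_neg (by simp [h]), PySem.Dict.getD_of_not_contains d [] h]
    simp

theorem pvA_eval (skills : List (String × List String)) :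
    determine_job_field skills =
      pvTail (pvMk6 (0 + pvG skills "Data Science & AI" * 3 + pvG skills "Programming Languages" * 1)
                    (0 + pvG skills "Web Development" * 3 + pvG skills "Programming Languages" * 1)
                    (0 + pvG skills "Mobile Development" * 3)
                    (0 + pvG skills "UI/UX Design" * 3)
                    (0 + pvG skills "Cloud & DevOps" * 3)
                    (0 + pvG skills "Web Development" * 2 + pvG skills "Databases" * 2)) := by
  simp only [determine_job_field, pvFieldWeights]
  simp only [List.foldl, pvStepA]
  simp [pvTail, pvMk6, pvG, PySem.Dict.insert, PySem.Dict.contains, PySem.Dict.empty]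

theorem pvBstep (k : String) (v : List String) (a b c d e f : Int) :
    pvAddItem (pvMk6 a b c d e f) (k, v) =
      pvMk6 (a + ((if k = "Data Science & AI" then (v.length : Int) else 0) * 3
                  + (if k = "Programming Languages" then (v.length : Int) else 0)))
            (b + ((if k = "Programming Languages" then (v.length : Int) else 0)
                  + (if k = "Web Development" then (v.length : Int) else 0) * 3))
            (c + (if k = "Mobile Development" then (v.length : Int) else 0) * 3)
            (d + (if k = "UI/UX Design" then (v.length : Int) else 0) * 3)
            (e + (if k = "Cloud & DevOps" then (v.length : Int) else 0) * 3)
            (f + ((if k = "Web Development" then (v.length : Int) else 0) * 2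
                  + (if k = "Databases" then (v.length : Int) else 0) * 2)) := by
  by_cases h1 : k = "Data Science & AI"
  · subst h1; simp [pvAddItem, pvIndex, pvMk6, PySem.Dict.modify, PySem.Dict.insert,
      PySem.Dict.getD, PySem.Dict.get?, PySem.Dict.contains]
  by_cases h2 : k = "Programming Languages"
  · subst h2; simp [pvAddItem, pvIndex, pvMk6, PySem.Dict.modify, PySem.Dict.insert,
      PySem.Dict.getD, PySem.Dict.get?, PySem.Dict.contains, h1]
  by_cases h3 : k = "Web Development"
  · subst h3; simp [pvAddItem, pvIndex, pvMk6, PySem.Dict.modify, PySem.Dict.insert,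
      PySem.Dict.getD, PySem.Dict.get?, PySem.Dict.contains, h1, h2]
  by_cases h4 : k = "Mobile Development"
  · subst h4; simp [pvAddItem, pvIndex, pvMk6, PySem.Dict.modify, PySem.Dict.insert,
      PySem.Dict.getD, PySem.Dict.get?, PySem.Dict.contains, h1, h2, h3]
  by_cases h5 : k = "UI/UX Design"
  · subst h5; simp [pvAddItem, pvIndex, pvMk6, PySem.Dict.modify, PySem.Dict.insert,
      PySem.Dict.getD, PySem.Dict.get?, PySem.Dict.contains, h1, h2, h3, h4]
  by_cases h6 : k = "Cloud & DevOps"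
  · subst h6; simp [pvAddItem, pvIndex, pvMk6, PySem.Dict.modify, PySem.Dict.insert,
      PySem.Dict.getD, PySem.Dict.get?, PySem.Dict.contains, h1, h2, h3, h4, h5]
  by_cases h7 : k = "Databases"
  · subst h7; simp [pvAddItem, pvIndex, pvMk6, PySem.Dict.modify, PySem.Dict.insert,
      PySem.Dict.getD, PySem.Dict.get?, PySem.Dict.contains, h1, h2, h3, h4, h5, h6]
  · have g1 : ("Data Science & AI" == k) = false := beq_eq_false_iff_ne.mpr (Ne.symm h1)
    have g2 : ("Programming Languages" == k) = false := beq_eq_false_iff_ne.mpr (Ne.symm h2)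
    have g3 : ("Web Development" == k) = false := beq_eq_false_iff_ne.mpr (Ne.symm h3)
    have g4 : ("Mobile Development" == k) = false := beq_eq_false_iff_ne.mpr (Ne.symm h4)
    have g5 : ("UI/UX Design" == k) = false := beq_eq_false_iff_ne.mpr (Ne.symm h5)
    have g6 : ("Cloud & DevOps" == k) = false := beq_eq_false_iff_ne.mpr (Ne.symm h6)
    have g7 : ("Databases" == k) = false := beq_eq_false_iff_ne.mpr (Ne.symm h7)
    simp [pvAddItem, pvIndex, pvMk6, PySem.Dict.getD, PySem.Dict.get?, List.find?,
      g1, g2, g3, g4, g5, g6, g7, h1, h2, h3, h4, h5, h6, h7]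


theorem pvS_cons (c : String) (k : String) (v : List String) (l : List (String × List String)) :
    pvS c ((k, v) :: l) = (if k = c then (v.length : Int) else 0) + pvS c l := by
  simp [pvS]

theorem pvB_fold (l : List (String × List String)) :
    ∀ (a b c d e f : Int),
      l.foldl pvAddItem (pvMk6 a b c d e f) =
        pvMk6 (a + (pvS "Data Science & AI" l * 3 + pvS "Programming Languages" l))
              (b + (pvS "Programming Languages" l + pvS "Web Development" l * 3))
              (c + pvS "Mobile Development" l * 3)
              (d + pvS "UI/UX Design" l * 3)
              (e + pvS "Cloud & DevOps" l * 3)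
              (f + (pvS "Web Development" l * 2 + pvS "Databases" l * 2)) := by
  induction l with
  | nil => intro a b c d e f; simp [pvS]
  | cons kv t ih =>
    intro a b c d e f
    obtain ⟨k, v⟩ := kv
    rw [List.foldl_cons, pvBstep, ih]
    simp only [pvS_cons, pvMk6, PySem.Dict.mk.injEq, List.cons.injEq, Prod.mk.injEq, and_true,
      true_and]
    refine ⟨by ring, by ring, by ring, by ring, by ring, by ring⟩


theorem pv_max_aux {α : Type} (g : α → Int) (l : List α) : ∀ (acc : Option α),
    List.foldl
      (fun acc x => match acc with | none => some x | some m => if m < x then some x else some m)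
      (acc.map g) (l.map g)
    = (List.foldl
        (fun acc x => match acc with | none => some x | some m => if g m < g x then some x else some m)
        acc l).map g := by
  induction l with
  | nil => intro acc; simp
  | cons x t ih =>
    intro acc
    cases acc with
    | none => simpa using ih (some x)
    | some m =>
      simp only [List.map_cons, List.foldl_cons, Option.map_some]
      by_cases h : g m < g x
      · rw [if_pos h, if_pos h]; simpa using ih (some x)
      · rw [if_neg h, if_neg h]; simpa using ih (some m)


theorem pv_max_map {α : Type} (l : List α) (g : α → Int) :
    PySem.List.max? (l.map g) (fun v => v) = (PySem.List.max? l g).map g := by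
  have h := pv_max_aux g l none
  simp only [Option.map_none] at h
  simp only [PySem.List.max?]
  convert h using 2
  funext acc x
  cases acc <;> rfl


theorem pvTail_eq (a b c d e f : Int) :
    pvTail (pvMk6 a b c d e f) = pvTailB (pvMk6 a b c d e f) := by
  have hnd : (pvMk6 a b c d e f).keys.Nodup := by
    simp [pvMk6, PySem.Dict.keys]
  have hv : (pvMk6 a b c d e f).values
      = (pvMk6 a b c d e f).keys.map (fun k => (pvMk6 a b c d e f).getD k 0) :=
    PySem.Dict.values_eq_map_keys _ hnd 0
  unfold pvTail pvTailB
  rw [hv, pv_max_map]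
  cases hb : PySem.List.max? (pvMk6 a b c d e f).keys (fun k => (pvMk6 a b c d e f).getD k 0) with
  | none =>
    rw [PySem.List.max?_eq_none_iff] at hb
    simp [pvMk6, PySem.Dict.keys] at hb
  | some best =>
    have hsz : (pvMk6 a b c d e f).size = 6 := by simp [pvMk6, PySem.Dict.size]
    by_cases hz : (pvMk6 a b c d e f).getD best 0 = 0
    · simp [hsz, hz]
    · simp [hsz, hz]


theorem pvS_nil_of_not_mem (c : String) (l : List (String × List String))
    (h : c ∉ l.map Prod.fst) : pvS c l = 0 := by
  induction l with
  | nil => simp [pvS]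
  | cons kv t ih =>
    obtain ⟨k, v⟩ := kv
    rw [List.map_cons, List.mem_cons] at h
    rw [pvS_cons, if_neg (fun e => h (Or.inl e.symm)), ih (fun m => h (Or.inr m))]
    simp

theorem pvS_eq_pvG (skills : List (String × List String))
    (h : (skills.map Prod.fst).Nodup) (c : String) : pvS c skills = pvG skills c := by
  induction skills with
  | nil => simp [pvS, pvG, PySem.Dict.getD, PySem.Dict.get?]
  | cons kv t ih =>
    obtain ⟨k, v⟩ := kv
    rw [List.map_cons, List.nodup_cons] at h
    rw [pvS_cons]
    by_cases hk : k = c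
    · rw [if_pos hk, pvS_nil_of_not_mem c t (hk ▸ h.1), add_zero]
      simp [pvG, PySem.Dict.getD, PySem.Dict.get?_mk_cons, hk]
    · rw [if_neg hk, ih h.2]
      simp [pvG, PySem.Dict.getD, PySem.Dict.get?_mk_cons, hk]

theorem pvB_eval (skills : List (String × List String)) :
    determine_job_field_alt skills =
      pvTailB (pvMk6 (0 + (pvS "Data Science & AI" skills * 3 + pvS "Programming Languages" skills))
                     (0 + (pvS "Programming Languages" skills + pvS "Web Development" skills * 3))
                     (0 + pvS "Mobile Development" skills * 3)
                     (0 + pvS "UI/UX Design" skills * 3)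
                     (0 + pvS "Cloud & DevOps" skills * 3)
                     (0 + (pvS "Web Development" skills * 2 + pvS "Databases" skills * 2))) := by
  have h0 : pvFields.foldl (fun d f => d.insert f 0) PySem.Dict.empty = pvMk6 0 0 0 0 0 0 := by
    simp [pvFields, pvMk6, PySem.Dict.insert, PySem.Dict.contains, PySem.Dict.empty]
  simp only [determine_job_field_alt, h0, pvB_fold, pvTailB]

-- ===== VERDICT (by name: the statement is the Claim_ definition above) =====
theorem determine_job_field_spec : Claim_equal_determine_job_field := by
  intro skills _ hpre
  unfold Spec_determine_job_field
  have hs := pvS_eq_pvG skills hpre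
  rw [pvA_eval, pvB_eval, pvTail_eq]
  simp only [hs, zero_add]
  congr 1 <;> ring
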